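-- pv_equiv track=rewrite | github.com/quzhiii/thesis-skills | core/language_deep.py | _collect_inline_dollar_math_spans
-- ===== SOURCE A (Python) =====
-- def _collect_inline_dollar_math_spans(text: str) -> list[tuple[int, int]]:
--     spans: list[tuple[int, int]] = []
--     offset = 0
--     for line in text.splitlines(keepends=True):
--         open_start: int | None = None
--         idx = 0
--         while idx < len(line):
--             if line[idx] == "$" and (idx == 0 or line[idx - 1] != "\\"):
--                 if open_start is None:
--                     open_start = idx
--                 else:
--                     spans.append((offset + open_start, offset + idx + 1))
--                     open_start = None
--             idx += 1
--         offset += len(line)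
--     return spans
-- ===== SOURCE B (Python) =====
-- import re
--
-- _INLINE_DOLLAR = re.compile(r"(?<!\\)\$.*?(?<!\\)\$")
--
--
-- def _collect_inline_dollar_math_spans(text: str) -> list[tuple[int, int]]:
--     spans: list[tuple[int, int]] = []
--     offset = 0
--     for line in text.splitlines(keepends=True):
--         for m in _INLINE_DOLLAR.finditer(line):
--             spans.append((offset + m.start(), offset + m.end()))
--         offset += len(line)
--     return spans
-- ===== Notes on version B (the rewrite author's own statement) =====
-- stated objective: faster
-- what changed: Replaces A's hand-rolled per-line character scanner with open/close state by compiled-regex pattern matching: re.finditer(r'(?<!\\)\$.*?(?<!\\)\$') per keepends-line, whose leftmost non-overlapping non-greedy matches are exactly A's sequential dollar pairs. The regex engine's compiled C scan replaces the per-character Python loop (measured ~7x at the largest size).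
import Mathlib
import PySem

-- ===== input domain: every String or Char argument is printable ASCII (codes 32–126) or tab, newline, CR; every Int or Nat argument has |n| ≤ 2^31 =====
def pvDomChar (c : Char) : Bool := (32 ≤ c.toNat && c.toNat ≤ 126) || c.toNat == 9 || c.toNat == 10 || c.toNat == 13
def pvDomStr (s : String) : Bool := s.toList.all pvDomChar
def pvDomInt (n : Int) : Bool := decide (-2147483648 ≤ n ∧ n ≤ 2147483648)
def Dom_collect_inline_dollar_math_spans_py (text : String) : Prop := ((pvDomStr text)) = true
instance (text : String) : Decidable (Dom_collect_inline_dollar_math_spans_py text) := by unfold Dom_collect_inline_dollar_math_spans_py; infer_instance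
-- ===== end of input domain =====

-- B replaces A's per-line while-loop state machine by regex pattern matching:
-- re.finditer(r'(?<!\\)\$.*?(?<!\\)\$', line) per line (idiomatic; same return value).

-- Shared helper: text.splitlines(keepends=True), ported by hand (exact on the Dom alphabet,
-- where the only line breaks are '\n', '\r' and '\r\n'); used by both ports, as both Pythons
-- make the identical stdlib call.
def takeLine : List Char → List Char × List Char
  | [] => ([], [])
  | '\n' :: rest => (['\n'], rest)
  | '\r' :: '\n' :: rest => (['\r', '\n'], rest)
  | '\r' :: rest => (['\r'], rest)
  | c :: rest => (c :: (takeLine rest).1, (takeLine rest).2)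

theorem takeLine_snd_le : ∀ (cs : List Char), (takeLine cs).2.length ≤ cs.length := by
  intro cs
  fun_induction takeLine cs <;> simp_all <;> omega

theorem takeLine_snd_lt : ∀ (cs : List Char), cs ≠ [] → (takeLine cs).2.length < cs.length := by
  intro cs h
  fun_induction takeLine cs <;> simp_all <;>
    first
      | omega
      | exact takeLine_snd_le _

def splitKeepends : List Char → List (List Char)
  | [] => []
  | c :: rest =>
      (takeLine (c :: rest)).1 :: splitKeepends (takeLine (c :: rest)).2
termination_by cs => cs.length
decreasing_by exact takeLine_snd_lt (c :: rest) (by simp)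

-- ===== PORT A =====
-- the inner while loop of A, step for step (idx counts up; openStart is open_start)
def scanA (line : List Char) (offset : Int) (openStart : Option Nat) (idx : Nat)
    (spans : List (Int × Int)) : List (Int × Int) :=
  if idx < line.length then
    if line.getD idx ' ' == '$' && (idx == 0 || line.getD (idx - 1) ' ' != '\\') then
      match openStart with
      | none => scanA line offset (some idx) (idx + 1) spans
      | some o => scanA line offset none (idx + 1) (spans ++ [(offset + (o : Int), offset + (idx : Int) + 1)])
    else scanA line offset openStart (idx + 1) spans
  else spans
termination_by line.length - idx

def collect_inline_dollar_math_spans_py (text : String) : List (Int × Int) :=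
  ((splitKeepends text.toList).foldl
    (fun st line => (scanA line st.2 none 0 st.1, st.2 + (line.length : Int)))
    ([], (0 : Int))).1

-- ===== PORT B =====
-- Hand port of re.finditer(r'(?<!\\)\$.*?(?<!\\)\$', line), exact on splitlines(keepends=True)
-- lines over the Dom alphabet (there '\n' only occurs as the final char of a line, so the
-- ".*?  does not cross '\n'" rule of the regex engine can never reject a candidate match).

-- leftmost position i' ≥ i at which the lookbehind-guarded '\$' of the pattern matches
def findDollar (line : List Char) (i : Nat) : Option Nat :=
  if i < line.length then
    if line.getD i ' ' == '$' && (i == 0 || line.getD (i - 1) ' ' != '\\') then some i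
    else findDollar line (i + 1)
  else none
termination_by line.length - i

theorem findDollar_bounds (line : List Char) (i : Nat) :
    ∀ s, findDollar line i = some s → i ≤ s ∧ s < line.length := by
  fun_induction findDollar line i <;> intro s hs <;> simp_all <;> omega

-- finditer: leftmost match = first guarded '$' as opener, non-greedy .*? stops at the next
-- guarded '$' as closer; scanning resumes at m.end().  If no closer exists after the opener,
-- no later start can match either (a later match would itself begin at a guarded '$' after
-- the opener), so iteration ends.
def reFinditer (line : List Char) (p : Nat) : List (Nat × Nat) :=
  match hs : findDollar line p with
  | none => []
  | some s =>
    match he : findDollar line (s + 1) with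
    | none => []
    | some e => (s, e + 1) :: reFinditer line (e + 1)
termination_by line.length - p
decreasing_by
  have h1 := findDollar_bounds line p s hs
  have h2 := findDollar_bounds line (s + 1) e he
  omega

def collect_inline_dollar_math_spans_py_alt (text : String) : List (Int × Int) :=
  ((splitKeepends text.toList).foldl
    (fun st line =>
      (st.1 ++ (reFinditer line 0).map (fun m => (st.2 + (m.1 : Int), st.2 + (m.2 : Int))),
       st.2 + (line.length : Int)))
    ([], (0 : Int))).1

-- ===== PRECONDITION & SPEC =====
def Spec_collect_inline_dollar_math_spans_py (text : String) (out : List (Int × Int)) : Prop := out = collect_inline_dollar_math_spans_py_alt text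
instance (text : String) (out : List (Int × Int)) : Decidable (Spec_collect_inline_dollar_math_spans_py text out) := by unfold Spec_collect_inline_dollar_math_spans_py; infer_instance

-- ===== CLAIM (what is proved, stated in full; the proofs are below) =====
def Claim_equal_collect_inline_dollar_math_spans_py : Prop := ∀ (text : String), Dom_collect_inline_dollar_math_spans_py text → Spec_collect_inline_dollar_math_spans_py text (collect_inline_dollar_math_spans_py text)

-- ===== LEMMAS AND PROOFS =====

-- the list of indices of unescaped '$' in line, from position idx on
def dsNat (line : List Char) (idx : Nat) : List Nat :=
  if idx < line.length then
    if line.getD idx ' ' == '$' && (idx == 0 || line.getD (idx - 1) ' ' != '\\') then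
      idx :: dsNat line (idx + 1)
    else dsNat line (idx + 1)
  else []
termination_by line.length - idx

def pairUpN : List Nat → List (Nat × Nat)
  | a :: b :: rest => (a, b) :: pairUpN rest
  | _ => []

theorem scanA_eq (line : List Char) (offset : Int) :
    ∀ (n idx : Nat) (openStart : Option Nat) (spans : List (Int × Int)),
      line.length - idx ≤ n →
      scanA line offset openStart idx spans =
        spans ++ (pairUpN (openStart.toList ++ dsNat line idx)).map
          (fun ab => (offset + (ab.1 : Int), offset + (ab.2 : Int) + 1)) := by
  intro n
  induction n with
  | zero =>
    intro idx openStart spans h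
    have hge : ¬ idx < line.length := by omega
    rw [scanA.eq_def, dsNat]
    cases openStart <;> simp [hge, pairUpN]
  | succ n ih =>
    intro idx openStart spans h
    by_cases hlt : idx < line.length
    · rw [scanA.eq_def, dsNat]
      simp only [if_pos hlt]
      by_cases hc : (line.getD idx ' ' == '$' && (idx == 0 || line.getD (idx - 1) ' ' != '\\')) = true
      · simp only [if_pos hc]
        cases openStart with
        | none =>
          rw [ih (idx + 1) (some idx) spans (by omega)]
          simp
        | some o =>
          show scanA line offset none (idx + 1)
              (spans ++ [(offset + (o : Int), offset + (idx : Int) + 1)]) = _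
          rw [ih (idx + 1) none (spans ++ [(offset + (o : Int), offset + (idx : Int) + 1)]) (by omega)]
          simp [pairUpN]
      · simp only [if_neg hc]
        exact ih (idx + 1) openStart spans (by omega)
    · rw [scanA.eq_def, dsNat]
      cases openStart <;> simp [hlt, pairUpN]

-- dsNat unfolds through findDollar: dsNat jumps to the first guarded '$'
theorem dsNat_findDollar (line : List Char) :
    ∀ (n i : Nat), line.length - i ≤ n →
      dsNat line i = (match findDollar line i with
        | none => []
        | some s => s :: dsNat line (s + 1)) := by
  intro n
  induction n with
  | zero =>
    intro i h
    have hge : ¬ i < line.length := by omega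
    rw [dsNat, findDollar]
    simp [hge]
  | succ n ih =>
    intro i h
    by_cases hlt : i < line.length
    · rw [dsNat, findDollar]
      by_cases hc : (line.getD i ' ' == '$' && (i == 0 || line.getD (i - 1) ' ' != '\\')) = true
      · rw [if_pos hlt, if_pos hc, if_pos hlt, if_pos hc]
      · simp only [if_pos hlt, if_neg hc]
        exact ih (i + 1) (by omega)
    · rw [dsNat, findDollar]
      simp [hlt]

-- B's match list is exactly A's index list paired off two by two
theorem reFinditer_eq_pairUp (line : List Char) :
    ∀ (n p : Nat), line.length - p ≤ n →
      reFinditer line p = (pairUpN (dsNat line p)).map (fun ab => (ab.1, ab.2 + 1)) := by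
  intro n
  induction n with
  | zero =>
    intro p h
    rw [reFinditer, dsNat_findDollar line line.length p (by omega)]
    split
    next hs => simp [hs, pairUpN]
    next s hs =>
      have := findDollar_bounds line p s hs
      omega
  | succ n ih =>
    intro p h
    rw [reFinditer, dsNat_findDollar line line.length p (by omega)]
    split
    next hs => simp [hs, pairUpN]
    next s hs =>
      have hb1 := findDollar_bounds line p s hs
      simp only [hs]
      rw [dsNat_findDollar line line.length (s + 1) (by omega)]
      split
      next he => simp [he, pairUpN]
      next e he =>
        have hb2 := findDollar_bounds line (s + 1) e he
        rw [ih (e + 1) (by omega)]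
        simp [he, pairUpN]

theorem line_step_eq (line : List Char) (offset : Int) (spans : List (Int × Int)) :
    scanA line offset none 0 spans =
      spans ++ (reFinditer line 0).map (fun m => (offset + (m.1 : Int), offset + (m.2 : Int))) := by
  rw [scanA_eq line offset line.length 0 none spans (by omega)]
  rw [reFinditer_eq_pairUp line line.length 0 (by omega)]
  simp only [Option.toList_none, List.nil_append, List.map_map]
  apply congrArg
  apply List.map_congr_left
  intro ab _
  simp only [Function.comp_apply, Prod.mk.injEq]
  refine ⟨by trivial, ?_⟩
  push_cast
  ring

theorem fold_eq (lines : List (List Char)) :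
    ∀ (st : List (Int × Int) × Int),
      lines.foldl (fun st line => (scanA line st.2 none 0 st.1, st.2 + (line.length : Int))) st
      = lines.foldl (fun st line =>
          (st.1 ++ (reFinditer line 0).map (fun m => (st.2 + (m.1 : Int), st.2 + (m.2 : Int))),
           st.2 + (line.length : Int))) st := by
  induction lines with
  | nil => intro st; rfl
  | cons l ls ih =>
    intro st
    simp only [List.foldl_cons]
    rw [line_step_eq]
    exact ih _

-- ===== VERDICT (by name: the statement is the Claim_ definition above) =====
theorem collect_inline_dollar_math_spans_py_spec : Claim_equal_collect_inline_dollar_math_spans_py := by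
  intro text _
  unfold Spec_collect_inline_dollar_math_spans_py
  unfold collect_inline_dollar_math_spans_py collect_inline_dollar_math_spans_py_alt
  rw [fold_eq]
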